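-- pv_equiv track=rewrite | github.com/harshitch28/LegalAid_RAG_LLM_chatbot | src/context_builder.py | _clip_char_budget
-- ===== SOURCE A (Python) =====
-- from typing import List, Dict, Any
--
-- def _clip_char_budget(blocks: List[Dict[str, str]], budget: int) -> List[Dict[str, str]]:
--     total = 0
--     out = []
--     for b in blocks:
--         c = b["content"]
--         if total + len(c) <= budget:
--             out.append(b)
--             total += len(c)
--         else:
--             # take a slice if nothing has been added from this source
--             remaining = max(0, budget - total)
--             if remaining > 0:
--                 out.append({"type": b["type"], "content": c[:remaining], "meta": b.get("meta", {})})
--                 total += remaining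
--             break
--     return out
-- ===== SOURCE B (Python) =====
-- from bisect import bisect_right
--
--
-- def _clip_char_budget(blocks, budget):
--     # prefix totals: totals[i] = total characters of blocks[0..i]; the table stops
--     # at the first entry past the budget (later blocks cannot matter)
--     totals = []
--     acc = 0
--     for b in blocks:
--         acc += len(b["content"])
--         totals.append(acc)
--         if acc > budget:
--             break
--     # first block that no longer fits, by binary search on the monotone table
--     cut = bisect_right(totals, budget)
--     out = blocks[:cut]
--     if cut < len(blocks):
--         before = totals[cut - 1] if cut else 0
--         remaining = budget - before
--         if remaining > 0:
--             b = blocks[cut]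
--             out.append({"type": b["type"], "content": b["content"][:remaining],
--                         "meta": b.get("meta", {})})
--     return out
-- ===== Notes on version B (the rewrite author's own statement) =====
-- stated objective: alternative
-- what changed: Replaces A's interleaved accumulate-append-break output loop by a separate pass that builds a monotone prefix-total table (stopping past the budget), a bisect_right binary search locating the cut block, and a slice-and-append assembly.
import Mathlib
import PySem

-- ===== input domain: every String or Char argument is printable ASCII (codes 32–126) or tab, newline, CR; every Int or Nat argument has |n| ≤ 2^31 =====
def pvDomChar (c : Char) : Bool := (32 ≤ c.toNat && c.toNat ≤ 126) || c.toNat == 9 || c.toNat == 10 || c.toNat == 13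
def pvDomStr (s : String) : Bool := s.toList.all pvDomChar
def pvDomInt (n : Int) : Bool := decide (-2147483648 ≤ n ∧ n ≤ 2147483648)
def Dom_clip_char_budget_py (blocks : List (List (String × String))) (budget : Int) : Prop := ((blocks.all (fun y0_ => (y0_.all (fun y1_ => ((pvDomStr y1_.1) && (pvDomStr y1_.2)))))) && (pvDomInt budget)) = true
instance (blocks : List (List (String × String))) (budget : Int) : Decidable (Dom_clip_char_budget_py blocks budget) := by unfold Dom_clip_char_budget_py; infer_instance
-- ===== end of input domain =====

-- B clips the blocks to the character budget via a prefix-sum table and bisect_right instead of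
-- A's accumulate-and-break loop; alternative decomposition, no speed claim. Return values only.

-- dict access b[k] / b.get(k, …): first-match lookup in the association list; the "" default never
-- fires inside Pre_ (the key is required present there; b.get("meta", {})'s Python default {} is
-- not a String, which is exactly why Pre_ requires "meta")
def pvGetD (b : List (String × String)) (k : String) : String :=
  (List.lookup k b).getD ""

-- ===== PORT A =====
def clipA_go (budget : Int) (blocks : List (List (String × String))) (total : Int) :
    List (List (String × String)) :=
  match blocks with
  | [] => []
  | b :: rest =>
    let c := pvGetD b "content"
    if total + PySem.Str.len c ≤ budget then
      b :: clipA_go budget rest (total + PySem.Str.len c)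
    else
      let remaining := max 0 (budget - total)
      if remaining > 0 then
        [[("type", pvGetD b "type"),
          ("content", PySem.Str.slice c none (some remaining)),
          ("meta", pvGetD b "meta")]]
      else []

def clip_char_budget_py (blocks : List (List (String × String))) (budget : Int) :
    List (List (String × String)) :=
  clipA_go budget blocks 0

-- ===== PORT B =====
-- the table-building loop of B: running prefix totals, stopping past the budget
def pvTotals (budget : Int) (acc : Int) : List (List (String × String)) → List Int
  | [] => []
  | b :: rest =>
    let acc' := acc + PySem.Str.len (pvGetD b "content")
    if acc' > budget then [acc']
    else acc' :: pvTotals budget acc' rest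

def clip_char_budget_py_alt (blocks : List (List (String × String))) (budget : Int) :
    List (List (String × String)) :=
  let totals := pvTotals budget 0 blocks
  let cut := PySem.List.bisectRight totals budget
  let out := blocks.take cut
  if cut < blocks.length then
    let before := if cut = 0 then 0 else totals.getD (cut - 1) 0
    let remaining := budget - before
    if remaining > 0 then
      let b := blocks.getD cut []
      out ++ [[("type", pvGetD b "type"),
               ("content", PySem.Str.slice (pvGetD b "content") none (some remaining)),
               ("meta", pvGetD b "meta")]]
    else out
  else out

-- ===== PRECONDITION & SPEC =====
-- characters in the first i blocks (prefix sums of the content lengths)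
def pvPrefix (blocks : List (List (String × String))) (i : Nat) : Int :=
  ((blocks.take i).map (fun b => PySem.Str.len ((List.lookup "content" b).getD ""))).sum

-- Pre_ requires (a) every block the loop reaches (the first block, or one whose preceding prefix
-- total is still within the budget) to carry the key "content" — without it A (and B) raise KeyError — and (b) the block
-- that actually gets SLICED (its prefix totals straddle the budget strictly) to carry "type" and
-- "meta" — without "type" A raises KeyError there, and without "meta" A returns the Python dict
-- {} where a string is expected (outside the declared type).
def Pre_clip_char_budget_py (blocks : List (List (String × String))) (budget : Int) : Prop :=
  ∀ i ∈ List.range blocks.length,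
    ((i = 0 ∨ pvPrefix blocks i ≤ budget) →
      (List.lookup "content" (blocks.getD i [])).isSome = true) ∧
    ((pvPrefix blocks i < budget ∧ budget < pvPrefix blocks (i + 1)) →
      ((List.lookup "type" (blocks.getD i [])).isSome = true ∧
       (List.lookup "meta" (blocks.getD i [])).isSome = true))

instance (blocks : List (List (String × String))) (budget : Int) :
    Decidable (Pre_clip_char_budget_py blocks budget) := by
  unfold Pre_clip_char_budget_py; infer_instance

def pvWitness_clip_char_budget_py : (List (List (String × String))) × Int :=
  ([[("type", "law"), ("content", "hello"), ("meta", "s1")],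
    [("type", "law"), ("content", "world"), ("meta", "s2")]], 7)

def Spec_clip_char_budget_py (blocks : List (List (String × String))) (budget : Int)
    (out : List (List (String × String))) : Prop :=
  out = clip_char_budget_py_alt blocks budget

instance (blocks : List (List (String × String))) (budget : Int)
    (out : List (List (String × String))) :
    Decidable (Spec_clip_char_budget_py blocks budget out) := by
  unfold Spec_clip_char_budget_py; infer_instance

-- ===== CLAIM (what is proved, stated in full; the proofs are below) =====
def Claim_equal_clip_char_budget_py : Prop :=
  ∀ (blocks : List (List (String × String))) (budget : Int),
    Dom_clip_char_budget_py blocks budget → Pre_clip_char_budget_py blocks budget →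
      Spec_clip_char_budget_py blocks budget (clip_char_budget_py blocks budget)

-- ===== LEMMAS AND PROOFS =====

-- reference recursion both ports are reduced to (budget is the REMAINING budget)
def pvRef : List (List (String × String)) → Int → List (List (String × String))
  | [], _ => []
  | b :: rest, budget =>
    let n := PySem.Str.len (pvGetD b "content")
    if n ≤ budget then b :: pvRef rest (budget - n)
    else if 0 < budget then
      [[("type", pvGetD b "type"),
        ("content", PySem.Str.slice (pvGetD b "content") none (some budget)),
        ("meta", pvGetD b "meta")]]
    else []

theorem clipA_eq_ref (blocks : List (List (String × String))) :
    ∀ budget total, clipA_go budget blocks total = pvRef blocks (budget - total) := by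
  induction blocks with
  | nil => intro budget total; rfl
  | cons b rest ih =>
    intro budget total
    simp only [clipA_go, pvRef]
    by_cases h : total + PySem.Str.len (pvGetD b "content") ≤ budget
    · rw [if_pos h, if_pos (by omega : PySem.Str.len (pvGetD b "content") ≤ budget - total), ih]
      have : budget - (total + PySem.Str.len (pvGetD b "content"))
           = budget - total - PySem.Str.len (pvGetD b "content") := by ring
      rw [this]
    · rw [if_neg h, if_neg (by omega : ¬ PySem.Str.len (pvGetD b "content") ≤ budget - total)]
      by_cases h2 : 0 < budget - total
      · rw [if_pos (by omega : max 0 (budget - total) > 0), if_pos h2,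
            (by omega : max 0 (budget - total) = budget - total)]
      · rw [if_neg (by omega : ¬ max 0 (budget - total) > 0), if_neg h2]

theorem len_nonneg (s : String) : 0 ≤ PySem.Str.len s := by
  simp [PySem.Str.len_eq]

theorem pvTotals_shift (xs : List (List (String × String))) :
    ∀ budget a b, pvTotals budget (a + b) xs = (pvTotals (budget - a) b xs).map (a + ·) := by
  induction xs with
  | nil => intro budget a b; rfl
  | cons x xs ih =>
    intro budget a b
    simp only [pvTotals]
    by_cases h : b + PySem.Str.len (pvGetD x "content") > budget - a
    · rw [if_pos (by omega : a + b + PySem.Str.len (pvGetD x "content") > budget), if_pos h]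
      simp only [List.map_cons, List.map_nil]
      congr 1
      ring
    · rw [if_neg (by omega : ¬ a + b + PySem.Str.len (pvGetD x "content") > budget), if_neg h]
      simp only [List.map_cons]
      rw [show a + b + PySem.Str.len (pvGetD x "content")
            = a + (b + PySem.Str.len (pvGetD x "content")) by ring, ih]

theorem pvTotals_le (xs : List (List (String × String))) :
    ∀ budget a y, y ∈ pvTotals budget a xs → a ≤ y := by
  induction xs with
  | nil => intro budget a y hy; simp [pvTotals] at hy
  | cons x xs ih =>
    intro budget a y hy
    have h0 : 0 ≤ PySem.Str.len (pvGetD x "content") := len_nonneg _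
    simp only [pvTotals] at hy
    split at hy
    · simp only [List.mem_singleton] at hy; omega
    · simp only [List.mem_cons] at hy
      rcases hy with rfl | hy
      · omega
      · have := ih budget _ y hy; omega

theorem pvTotals_sorted (xs : List (List (String × String))) :
    ∀ budget a, List.Pairwise (· ≤ ·) (pvTotals budget a xs) := by
  induction xs with
  | nil => intro budget a; simp [pvTotals]
  | cons x xs ih =>
    intro budget a
    simp only [pvTotals]
    split
    · simp
    · simp only [List.pairwise_cons]
      exact ⟨fun y hy => pvTotals_le xs budget _ y hy, ih budget _⟩

theorem pvTotals_length_le (xs : List (List (String × String))) :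
    ∀ budget a, (pvTotals budget a xs).length ≤ xs.length := by
  induction xs with
  | nil => intro budget a; simp [pvTotals]
  | cons x xs ih =>
    intro budget a
    simp only [pvTotals]
    split
    · simp
    · simpa using ih budget _

-- the element just past a takeWhile prefix falsifies the predicate (first failure)
theorem takeWhile_stop {α : Type} (p : α → Bool) :
    ∀ (l : List α) (h : (l.takeWhile p).length < l.length),
      p (l[(l.takeWhile p).length]'h) = false := by
  intro l
  induction l with
  | nil => intro h; simp at h
  | cons a l ih =>
    intro h
    by_cases hp : p a
    · simp only [List.takeWhile_cons, if_pos hp] at h ⊢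
      simpa using ih (by simpa using h)
    · simp only [List.takeWhile_cons, if_neg hp] at h ⊢
      simpa using hp

theorem bisect_eq_takeWhile (xs : List Int) (x : Int) (h : List.Pairwise (· ≤ ·) xs) :
    PySem.List.bisectRight xs x = (xs.takeWhile (fun t => t ≤ x)).length := by
  obtain ⟨hle, hlo, hhi⟩ := PySem.List.bisectRight_spec xs x h
  set k := PySem.List.bisectRight xs x with hk
  set t := (xs.takeWhile (fun t => decide (t ≤ x))).length with htdef
  have htlen : t ≤ xs.length := (List.takeWhile_prefix _).length_le
  rcases Nat.lt_trichotomy k t with hlt | heq | hgt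
  · have hk1 : k < xs.length := lt_of_lt_of_le hlt htlen
    have h1 := hhi k hk1 (le_refl k)
    have h2 : xs[k] ≤ x := by
      have hpre := List.takeWhile_prefix (l := xs) (p := fun t => decide (t ≤ x))
      have hgeq := hpre.getElem (i := k) hlt
      have hm := List.mem_takeWhile_imp (List.getElem_mem hlt)
      rw [hgeq] at hm
      simpa using hm
    omega
  · exact heq
  · have ht1 : t < xs.length := lt_of_lt_of_le hgt hle
    have h2 := takeWhile_stop (fun t => decide (t ≤ x)) xs ht1
    simp only [decide_eq_false_iff_not] at h2
    have h1 := hlo ((xs.takeWhile (fun t => decide (t ≤ x))).length) (by omega) (by omega)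
    omega

theorem map_getD_add (T : List Int) (k : Nat) (n : Int) (hk : k < T.length) :
    (T.map (n + ·)).getD k 0 = n + T.getD k 0 := by
  rw [List.getD_eq_getElem _ _ (by simpa using hk), List.getD_eq_getElem _ _ hk,
      List.getElem_map]

theorem clipB_eq_ref (blocks : List (List (String × String))) :
    ∀ budget, clip_char_budget_py_alt blocks budget = pvRef blocks budget := by
  induction blocks with
  | nil =>
    intro budget
    simp [clip_char_budget_py_alt, pvRef, pvTotals]
  | cons b rest ih =>
    intro budget
    set n := PySem.Str.len (pvGetD b "content") with hn
    set T := pvTotals (budget - n) 0 rest with hT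
    have hs := pvTotals_shift rest budget n 0
    rw [add_zero] at hs
    have hTsorted : List.Pairwise (· ≤ ·) T := pvTotals_sorted rest (budget - n) 0
    set c := PySem.List.bisectRight T (budget - n) with hc
    have hcleT : c ≤ T.length := by
      rw [hc, bisect_eq_takeWhile _ _ hTsorted]
      exact (List.takeWhile_prefix _).length_le
    have hcle : c ≤ rest.length :=
      le_trans hcleT (by rw [hT]; exact pvTotals_length_le rest (budget - n) 0)
    simp only [pvRef]
    by_cases hnb : n ≤ budget
    · -- block b fits whole
      have totals_eq : pvTotals budget 0 (b :: rest) = n :: T.map (n + ·) := by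
        simp only [pvTotals, zero_add, ← hn]
        rw [if_neg (by omega), hs, ← hT]
      have htotsorted : List.Pairwise (· ≤ ·) (n :: T.map (n + ·)) := by
        rw [← totals_eq]; exact pvTotals_sorted (b :: rest) budget 0
      have hpred : ((fun t => decide (t ≤ budget)) ∘ fun x => n + x)
          = (fun t : Int => decide (t ≤ budget - n)) := by
        funext t
        simp only [Function.comp_apply]
        exact decide_eq_decide.mpr (by omega)
      have hcut : PySem.List.bisectRight (n :: T.map (n + ·)) budget = c + 1 := by
        rw [bisect_eq_takeWhile _ _ htotsorted, List.takeWhile_cons, if_pos (by simpa using hnb),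
            List.takeWhile_map, hpred, List.length_cons, List.length_map, hc,
            bisect_eq_takeWhile _ _ hTsorted]
      rw [if_pos hnb, ← ih, ← hn]
      simp only [clip_char_budget_py_alt]
      rw [totals_eq, hcut, ← hT, ← hc]
      simp only [List.take_succ_cons, List.length_cons, Nat.add_lt_add_iff_right,
                 Nat.succ_ne_zero, if_false, Nat.add_sub_cancel, List.getD_cons_succ,
                 List.cons_append]
      by_cases hcl : c < rest.length
      · rw [if_pos hcl, if_pos hcl]
        have hbefore : (n :: T.map (n + ·)).getD c 0
            = n + (if c = 0 then 0 else T.getD (c - 1) 0) := by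
          rcases c with _ | k
          · simp
          · rw [List.getD_cons_succ, if_neg (Nat.succ_ne_zero k), Nat.succ_sub_one,
                map_getD_add _ _ _ (by omega)]
        rw [hbefore, sub_add_eq_sub_sub]
        split_ifs <;> rfl
      · rw [if_neg hcl, if_neg hcl]
    · -- block b is the cut block
      have totals_eq : pvTotals budget 0 (b :: rest) = [n] := by
        simp only [pvTotals, zero_add, ← hn]
        rw [if_pos (by omega)]
      have hcut : PySem.List.bisectRight [n] budget = 0 := by
        rw [bisect_eq_takeWhile _ _ (List.pairwise_singleton _ _), List.takeWhile_cons,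
            if_neg (by simpa using hnb)]
        rfl
      rw [if_neg hnb]
      simp only [clip_char_budget_py_alt]
      rw [totals_eq, hcut]
      simp only [List.take_zero, List.length_cons, Nat.succ_pos, if_pos, List.getD_cons_zero,
                 sub_zero, List.nil_append]

-- ===== VERDICT (by name: the statement is the Claim_ definition above) =====
theorem clip_char_budget_py_spec : Claim_equal_clip_char_budget_py := by
  intro blocks budget _ _
  unfold Spec_clip_char_budget_py clip_char_budget_py
  rw [clipA_eq_ref, clipB_eq_ref]
  norm_num
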